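-- pv_equiv track=rewrite | github.com/Ayushraj021/Python-learning | single-space-between-the-words.py | sms_encoding
-- ===== SOURCE A (Python) =====
-- def sms_encoding(data):
--     vowels = 'AEIOUaeiou'
--
--     def encode_word(word):
--         # Retain word as is if it contains only vowels
--         if all(char in vowels for char in word):
--             return word
--         # Otherwise, retain only consonants
--         return ''.join(char for char in word if char not in vowels)
--
--     # Split the sentence into words
--     words = data.split()
--     # Encode each word
--     encoded_words = [encode_word(word) for word in words]
--     # Join the encoded words back into a sentence
--     return ' '.join(encoded_words)
-- ===== SOURCE B (Python) =====
-- def sms_encoding(data):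
--     vowels = 'AEIOUaeiou'
--     pieces = []   # finished encoded words
--     word = []     # chars of the current word
--     cons = []     # its non-vowel chars
--     for c in data:
--         if c.isspace():
--             if word:
--                 pieces.append(''.join(cons if cons else word))
--                 word = []
--                 cons = []
--         else:
--             word.append(c)
--             if c not in vowels:
--                 cons.append(c)
--     if word:
--         pieces.append(''.join(cons if cons else word))
--     return ' '.join(pieces)
-- ===== Notes on version B (the rewrite author's own statement) =====
-- stated objective: alternative
-- what changed: B is a single character-level streaming pass with explicit word/consonant accumulators flushed at whitespace boundaries, instead of A's staged split() / per-word all()-test-plus-filter / join pipeline.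
import Mathlib
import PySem

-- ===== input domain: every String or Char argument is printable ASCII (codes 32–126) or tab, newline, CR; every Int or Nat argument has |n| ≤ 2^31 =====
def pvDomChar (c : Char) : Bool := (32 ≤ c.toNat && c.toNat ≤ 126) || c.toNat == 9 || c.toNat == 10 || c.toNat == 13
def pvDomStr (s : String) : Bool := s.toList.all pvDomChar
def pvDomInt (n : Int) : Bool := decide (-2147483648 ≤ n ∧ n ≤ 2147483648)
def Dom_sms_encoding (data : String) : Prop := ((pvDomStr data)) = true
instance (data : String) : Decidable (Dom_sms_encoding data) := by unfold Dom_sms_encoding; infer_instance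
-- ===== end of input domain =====

-- B rewrites A's staged split()/encode-each-word/join pipeline as a single character-level
-- streaming pass with word/consonant accumulators flushed at whitespace boundaries (objective: alternative).

-- ===== PORT A =====
def pvVowels : List Char := "AEIOUaeiou".toList

-- encode_word: if all chars are vowels keep the word, else ''.join of the non-vowel chars
def pvEncodeWordA (word : String) : String :=
  if word.toList.all (fun c => pvVowels.contains c) then word
  else String.ofList (word.toList.filter (fun c => !pvVowels.contains c))

def sms_encoding (data : String) : String :=
  PySem.Str.join " " ((PySem.Str.split₀ data).map pvEncodeWordA)

-- ===== PORT B =====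
-- one step of B's loop body; state = (pieces, word, cons), each kept in order (Python append = ++ [c])
def pvStepB (st : List (List Char) × List Char × List Char) (c : Char) :
    List (List Char) × List Char × List Char :=
  let (pieces, word, cons) := st
  if PySem.Chars.isspace c then
    if word.isEmpty then (pieces, [], [])
    else (pieces ++ [if cons.isEmpty then word else cons], [], [])
  else
    (pieces, word ++ [c], if !pvVowels.contains c then cons ++ [c] else cons)

def sms_encoding_alt (data : String) : String :=
  let st := data.toList.foldl pvStepB ([], [], [])
  let pieces :=
    if st.2.1.isEmpty then st.1
    else st.1 ++ [if st.2.2.isEmpty then st.2.1 else st.2.2]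
  PySem.Str.join " " (pieces.map String.ofList)

-- ===== PRECONDITION & SPEC =====
def Spec_sms_encoding (data : String) (out : String) : Prop := out = sms_encoding_alt data
instance (data : String) (out : String) : Decidable (Spec_sms_encoding data out) := by unfold Spec_sms_encoding; infer_instance

-- ===== CLAIM (what is proved, stated in full; the proofs are below) =====
def Claim_equal_sms_encoding : Prop := ∀ (data : String), Dom_sms_encoding data → Spec_sms_encoding data (sms_encoding data)

-- ===== LEMMAS AND PROOFS =====

-- word-level encoding on List Char (what both programs compute per word)
def pvEnc (w : List Char) : List Char :=
  if (w.filter (fun c => !pvVowels.contains c)).isEmpty then w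
  else w.filter (fun c => !pvVowels.contains c)

-- flushing B's final state
def pvFinish (st : List (List Char) × List Char × List Char) : List (List Char) :=
  if st.2.1.isEmpty then st.1
  else st.1 ++ [if st.2.2.isEmpty then st.2.1 else st.2.2]

theorem pv_finish_enc (pieces : List (List Char)) (word : List Char) :
    pvFinish (pieces, word, word.filter (fun c => !pvVowels.contains c)) =
      if word.isEmpty then pieces else pieces ++ [pvEnc word] := by
  simp only [pvFinish, pvEnc]

-- the streaming invariant: B's fold, flushed, computes encode of split₀.go's words
theorem pv_fold_go (cs : List Char) (acc : List (List Char)) (word : List Char) :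
    pvFinish (cs.foldl pvStepB (acc.reverse.map pvEnc, word,
        word.filter (fun c => !pvVowels.contains c))) =
      (PySem.Chars.split₀.go cs word.reverse acc).map pvEnc := by
  induction cs generalizing acc word with
  | nil =>
    simp only [List.foldl, PySem.Chars.split₀.go, pv_finish_enc]
    by_cases hw : word.isEmpty
    · simp [List.isEmpty_iff.mp hw]
    · have : ¬ word.reverse.isEmpty := by simp_all
      simp [hw, this]
  | cons c rest ih =>
    simp only [List.foldl, pvStepB, PySem.Chars.split₀.go]
    by_cases hs : PySem.Chars.isspace c
    · by_cases hw : word.isEmpty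
      · have hw' : word = [] := List.isEmpty_iff.mp hw
        have hwr : word.reverse.isEmpty := by simp [hw']
        simpa [hs, hw, hwr, hw'] using ih acc []
      · have hwr : ¬ word.reverse.isEmpty := by simp_all
        have key := ih (word :: acc) []
        simp only [List.reverse_cons, List.map_append, List.filter_nil, List.map,
          List.reverse_nil] at key
        by_cases hc : (word.filter (fun c => !pvVowels.contains c)).isEmpty
        · simpa [hs, hw, hwr, hc, pvEnc] using key
        · simpa [hs, hw, hwr, hc, pvEnc] using key
    · have hfil : (word ++ [c]).filter (fun x => !pvVowels.contains x) =
          (if !pvVowels.contains c then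
            word.filter (fun x => !pvVowels.contains x) ++ [c]
          else word.filter (fun x => !pvVowels.contains x)) := by
        by_cases hv : pvVowels.contains c
        · simp only [List.filter_append, hv, Bool.not_true]
          have : c ∈ pvVowels := by simpa using hv
          simp [this]
        · simp only [List.filter_append, hv, Bool.not_false, if_true]
          have : c ∉ pvVowels := by simpa using hv
          simp [this]
      have key := ih acc (word ++ [c])
      simp only [List.reverse_append, List.reverse_singleton, List.singleton_append] at key
      rw [hfil] at key
      simpa [hs] using key

theorem pv_enc_word (w : List Char) :
    pvEncodeWordA (String.ofList w) = String.ofList (pvEnc w) := by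
  have hiff : (∀ x ∈ w, x ∈ pvVowels) ↔
      (w.filter (fun c => !pvVowels.contains c)).isEmpty := by
    rw [List.isEmpty_iff, List.filter_eq_nil_iff]
    constructor
    · intro h a ha; simp [h a ha]
    · intro h a ha; have := h a ha; simpa using this
  simp only [pvEncodeWordA, pvEnc, String.toList_ofList, List.all_eq_true,
    List.contains_eq_mem, decide_eq_true_eq]
  by_cases h : (w.filter (fun c => !pvVowels.contains c)).isEmpty
  · have h' : (w.filter (fun c => !decide (c ∈ pvVowels))).isEmpty = true := by
      simpa [List.contains_eq_mem] using h
    rw [if_pos (hiff.mpr h), if_pos h']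
  · have hn : ¬ (∀ x ∈ w, x ∈ pvVowels) := fun hh => h (hiff.mp hh)
    have h' : ¬ (w.filter (fun c => !decide (c ∈ pvVowels))).isEmpty = true := by
      simpa [List.contains_eq_mem] using h
    rw [if_neg hn, if_neg h']

-- ===== VERDICT (by name: the statement is the Claim_ definition above) =====
theorem sms_encoding_spec : Claim_equal_sms_encoding := by
  intro data _
  unfold Spec_sms_encoding sms_encoding sms_encoding_alt
  have h := pv_fold_go data.toList [] []
  simp only [List.reverse_nil, List.map_nil, List.filter_nil] at h
  show _ = PySem.Str.join " " ((pvFinish (data.toList.foldl pvStepB ([], [], []))).map String.ofList)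
  rw [h]
  congr 1
  rw [PySem.Str.split₀]
  · rw [PySem.Chars.split₀, List.map_map, List.map_map]
    exact List.map_congr_left (fun w _ => pv_enc_word w)
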